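-- pv_equiv track=rewrite | github.com/IanCBrown/practice_questions | Akcija.py | minimal_price
-- ===== SOURCE A (Python) =====
-- def minimal_price(price_list):
--     price_list.sort(reverse=True)
--     # split list in to chunks of size 3
--     price_list = chunks(price_list, 3)
--     total = 0
--     for group in price_list:
--         if len(group) == 3:
--             total += group[0] + group[1]
--         else:
--             total += sum(group)
--     return total
--
-- def chunks(arr, n):
--     ret_list = []
--     for i in range(0, len(arr), n):
--         ret_list.append(arr[i:i + n])
--     return ret_list
-- ===== SOURCE B (Python) =====
-- def minimal_price(price_list):
--     # Complement decomposition: pay everything, minus the free (cheapest-of-triple) items,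
--     # which after the in-place descending sort are exactly the elements at indices 2, 5, 8, ...
--     price_list.sort(reverse=True)
--     return sum(price_list) - sum(price_list[2::3])
-- ===== Notes on version B (the rewrite author's own statement) =====
-- stated objective: simpler
-- what changed: Replaces the chunks helper and the grouped branch-accumulating loop by a total-minus-discounts complement: sum of all prices minus the sum of every third element of the descending-sorted list (price_list[2::3]); the Python-level chunk list construction disappears, a constant-factor saving.
import Mathlib
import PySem

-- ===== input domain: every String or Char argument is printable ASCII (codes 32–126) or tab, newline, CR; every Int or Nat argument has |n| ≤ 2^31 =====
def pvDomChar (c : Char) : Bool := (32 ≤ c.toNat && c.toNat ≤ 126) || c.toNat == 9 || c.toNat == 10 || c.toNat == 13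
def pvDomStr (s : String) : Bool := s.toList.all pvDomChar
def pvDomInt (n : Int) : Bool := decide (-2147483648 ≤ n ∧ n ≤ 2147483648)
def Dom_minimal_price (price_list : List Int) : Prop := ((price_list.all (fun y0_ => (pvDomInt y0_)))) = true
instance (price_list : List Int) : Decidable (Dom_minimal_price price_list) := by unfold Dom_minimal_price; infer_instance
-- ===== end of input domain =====

-- B replaces the chunk-and-branch accumulation by "total minus every third element of the
-- descending-sorted list" (a complement decomposition). Both A and B sort the argument in
-- place in Python; the theorems below are about the return value.

-- ===== PORT A =====
def chunksA (arr : List Int) (n : Int) : List (List Int) :=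
  (PySem.List.pyRange 0 arr.length n).foldl
    (fun ret i => ret ++ [PySem.List.slice arr (some i) (some (i + n))]) []

def minimal_price (price_list : List Int) : Int :=
  let pl := PySem.List.sorted price_list (fun x => x) true
  let groups := chunksA pl 3
  groups.foldl
    (fun total group =>
      if group.length = 3 then
        -- group[0], group[1]: in range since len(group) == 3
        total + ((PySem.List.pyGet? group 0).getD 0 + (PySem.List.pyGet? group 1).getD 0)
      else
        total + group.sum) 0

-- ===== PORT B =====
def minimal_price_alt (price_list : List Int) : Int :=
  let pl := PySem.List.sorted price_list (fun x => x) true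
  -- pl[2::3]: step 3 ≠ 0, so slice? always returns some
  pl.sum - ((PySem.List.slice? pl (some 2) none 3).getD []).sum

-- ===== PRECONDITION & SPEC =====
def Spec_minimal_price (price_list : List Int) (out : Int) : Prop := out = minimal_price_alt price_list
instance (price_list : List Int) (out : Int) : Decidable (Spec_minimal_price price_list out) := by unfold Spec_minimal_price; infer_instance

-- ===== CLAIM (what is proved, stated in full; the proofs are below) =====
def Claim_equal_minimal_price : Prop := ∀ (price_list : List Int), Dom_minimal_price price_list → Spec_minimal_price price_list (minimal_price price_list)

-- ===== LEMMAS AND PROOFS =====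

-- the elements at indices 2, 5, 8, … (Python s[2::3])
def every3 : List Int → List Int
  | _ :: _ :: c :: t => c :: every3 t
  | _ => []

-- pay the top two of each triple; for a final short group pay everything
def payRec : List Int → Int
  | a :: b :: _ :: t => a + b + payRec t
  | s => s.sum

lemma sum_sub_every3 : ∀ s : List Int, s.sum - (every3 s).sum = payRec s := by
  intro s
  induction s using payRec.induct with
  | case1 a b c t ih => simp [every3, payRec, ← ih]; ring
  | case2 s h =>
    rcases s with _ | ⟨a, _ | ⟨b, _ | ⟨c, t⟩⟩⟩
    · simp [every3, payRec]
    · simp [every3, payRec]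
    · simp [every3, payRec]
    · exact absurd rfl (h a b c t)

lemma cons3_getElem? (a b c : Int) (t : List Int) (m : ℕ) : (a::b::c::t)[m+3]? = t[m]? := by
  simp [show m+3 = ((m+1)+1)+1 from rfl]
lemma filterAux : ∀ (n : ℕ) (s : List Int), s.length ≤ n →
    List.filterMap (fun x : ℕ => s[(min 2 (s.length:ℤ) + 3 * (x:ℤ)).toNat]?)
      (List.range (if 2 < s.length then (((s.length:ℤ) - min 2 (s.length:ℤ) + 3 - 1) / 3).toNat else 0))
      = every3 s := by
  intro n
  induction n with
  | zero =>
    intro s hs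
    have : s = [] := List.eq_nil_of_length_eq_zero (by omega)
    subst this; simp [every3]
  | succ n ih =>
    intro s hs
    rcases s with _ | ⟨a, _ | ⟨b, _ | ⟨c, t⟩⟩⟩
    · simp [every3]
    · simp [every3]
    · simp [every3]
    · have hmin : min 2 ((a :: b :: c :: t).length : ℤ) = 2 := by simp; omega
      have hif : (if 2 < (a :: b :: c :: t).length then
            (((a :: b :: c :: t).length : ℤ) - min 2 ((a :: b :: c :: t).length:ℤ) + 3 - 1) / 3 |>.toNat else 0)
          = (if 2 < t.length then (((t.length:ℤ) - min 2 (t.length:ℤ) + 3 - 1) / 3).toNat else 0) + 1 := by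
        simp only [List.length_cons]
        split_ifs <;> push_cast <;> omega
      rw [hif, List.range_succ_eq_map, List.filterMap_cons]
      have h0 : (a :: b :: c :: t)[(min 2 ((a :: b :: c :: t).length:ℤ) + 3 * ((0:ℕ):ℤ)).toNat]? = some c := by
        rw [hmin]
        norm_num
        rfl
      rw [h0, List.filterMap_map]
      have htail : List.filterMap ((fun x : ℕ => (a :: b :: c :: t)[(min 2 ((a :: b :: c :: t).length:ℤ) + 3 * (x:ℤ)).toNat]?) ∘ Nat.succ)
            (List.range (if 2 < t.length then (((t.length:ℤ) - min 2 (t.length:ℤ) + 3 - 1) / 3).toNat else 0))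
          = List.filterMap (fun x : ℕ => t[(min 2 (t.length:ℤ) + 3 * (x:ℤ)).toNat]?)
            (List.range (if 2 < t.length then (((t.length:ℤ) - min 2 (t.length:ℤ) + 3 - 1) / 3).toNat else 0)) := by
        apply List.filterMap_congr
        intro k hk
        simp only [Function.comp, List.mem_range] at hk ⊢
        rw [hmin]
        rcases Nat.lt_or_ge t.length 3 with h | h
        · rw [if_neg (by omega)] at hk; omega
        · have h2 : min 2 ((t.length:ℤ)) = 2 := by omega
          rw [h2]
          have hidx : ((2:ℤ) + 3 * ((k:ℕ).succ:ℤ)).toNat = ((2:ℤ) + 3 * (k:ℤ)).toNat + 3 := by omega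
          rw [hidx, cons3_getElem?]
      rw [htail, ih t (by simp at hs ⊢; omega)]
      simp [every3]

lemma slice23 : ∀ s : List Int, PySem.List.slice? s (some 2) none 3 = some (every3 s) := by
  intro s
  simp only [PySem.List.slice?, PySem.List.sliceIndices]
  norm_num
  exact filterAux s.length s le_rfl

lemma foldl_push {α β : Type} (l : List α) (f : α → β) (acc : List β) :
    l.foldl (fun r i => r ++ [f i]) acc = acc ++ l.map f := by
  induction l generalizing acc with
  | nil => simp
  | cons x xs ih => simp [ih]

lemma chunksA_eq_map (s : List Int) :
    chunksA s 3 = (List.range ((s.length + 2) / 3)).map (fun k => (s.drop (3 * k)).take 3) := by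
  unfold chunksA
  rw [foldl_push]
  simp only [List.nil_append, PySem.List.pyRange]
  norm_num
  have hcnt : (if 0 < s.length then (((s.length:ℤ) + 3 - 1) / 3).toNat else 0) = (s.length + 2) / 3 := by
    split <;> omega
  rw [hcnt]
  apply List.map_congr_left
  intro k _
  have : ((3:ℤ) * (k:ℤ)) = ((3*k : ℕ) : ℤ) := by push_cast; ring
  simp only [Function.comp]
  rw [this]
  have h2 : ((3*k : ℕ) : ℤ) + 3 = ((3*k : ℕ) : ℤ) + ((3:ℕ):ℤ) := by norm_num
  rw [h2, PySem.List.slice_natCast_add]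

lemma foldl_chunks : ∀ (n : ℕ) (s : List Int), s.length ≤ n → ∀ t : Int,
    ((List.range ((s.length + 2) / 3)).map (fun k => (s.drop (3 * k)).take 3)).foldl
      (fun total group =>
        if group.length = 3 then
          total + ((PySem.List.pyGet? group 0).getD 0 + (PySem.List.pyGet? group 1).getD 0)
        else
          total + group.sum) t = t + payRec s := by
  intro n
  induction n with
  | zero =>
    intro s hs t
    have : s = [] := List.eq_nil_of_length_eq_zero (by omega)
    subst this
    simp [payRec]
  | succ n ih =>
    intro s hs t
    rcases s with _ | ⟨a, _ | ⟨b, _ | ⟨c, t'⟩⟩⟩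
    · simp [payRec]
    · simp [payRec, List.range_succ]
    · simp [payRec, List.range_succ]
    · have hcnt : ((a :: b :: c :: t').length + 2) / 3 = (t'.length + 2) / 3 + 1 := by
        simp; omega
      rw [hcnt, List.range_succ_eq_map, List.map_cons, List.foldl_cons]
      have hgrp : ((a :: b :: c :: t').drop (3 * 0)).take 3 = [a, b, c] := by simp
      rw [hgrp]
      have hstep : (if ([a, b, c] : List Int).length = 3 then
            t + ((PySem.List.pyGet? ([a, b, c] : List Int) 0).getD 0 + (PySem.List.pyGet? ([a, b, c] : List Int) 1).getD 0)
          else t + ([a, b, c] : List Int).sum) = t + (a + b) := by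
        simp [PySem.List.pyGet?, PySem.List.pyIdx?]
      rw [hstep, List.map_map]
      have hmap : List.map ((fun k => ((a :: b :: c :: t').drop (3 * k)).take 3) ∘ Nat.succ)
            (List.range ((t'.length + 2) / 3))
          = List.map (fun k => (t'.drop (3 * k)).take 3) (List.range ((t'.length + 2) / 3)) := by
        apply List.map_congr_left
        intro k _
        simp [Nat.succ_eq_add_one, Nat.mul_add]
      rw [hmap, ih t' (by simp at hs ⊢; omega) (t + (a + b))]
      simp [payRec]; ring

lemma core (s : List Int) :
    (chunksA s 3).foldl
      (fun total group =>
        if group.length = 3 then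
          total + ((PySem.List.pyGet? group 0).getD 0 + (PySem.List.pyGet? group 1).getD 0)
        else
          total + group.sum) 0
      = s.sum - ((PySem.List.slice? s (some 2) none 3).getD []).sum := by
  rw [slice23, chunksA_eq_map, foldl_chunks s.length s le_rfl 0]
  simp [sum_sub_every3]

-- ===== VERDICT (by name: the statement is the Claim_ definition above) =====
theorem minimal_price_spec : Claim_equal_minimal_price := by
  intro price_list _
  show minimal_price price_list = minimal_price_alt price_list
  unfold minimal_price minimal_price_alt
  exact core (PySem.List.sorted price_list (fun x => x) true)
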